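-- pv_equiv track=rewrite | github.com/hideousmaiden/youngtyp_corpora | website.py | make_left
-- ===== SOURCE A (Python) =====
-- def make_left(sents, id_sent, id_word, length=5):
--     try:
--         left = sents[id_sent][:id_word][::-1]
--     except IndexError:
--         return 'AAAA AAAA'
--     id_sent -= 1
--     while len(left) < length and id_sent >= 0:
--         n_needed = length - len(left)
--         if len(sents[id_sent]) < n_needed:
--             n_needed = len(sents[id_sent])
--         fetch = sents[id_sent][-n_needed::]
--         left += reversed(fetch)
--         id_sent -= 1
--     return ' '.join(left[::-1])
-- ===== SOURCE B (Python) =====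
-- def make_left(sents, id_sent, id_word, length=5):
--     try:
--         prefix = sents[id_sent][:id_word]
--     except IndexError:
--         return 'AAAA AAAA'
--     words = []
--     for s in sents[:max(id_sent, 0)]:
--         words.extend(s)
--     need = length - len(prefix)
--     ctx = words[-need:] if need > 0 else []
--     return ' '.join(ctx + prefix)
-- ===== Notes on version B (the rewrite author's own statement) =====
-- stated objective: simpler
-- what changed: Replaces A's backward sentence-by-sentence gather with n_needed bookkeeping and double reversal by one forward concatenation of the earlier sentences followed by a single tail slice of that word list.
import Mathlib
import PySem

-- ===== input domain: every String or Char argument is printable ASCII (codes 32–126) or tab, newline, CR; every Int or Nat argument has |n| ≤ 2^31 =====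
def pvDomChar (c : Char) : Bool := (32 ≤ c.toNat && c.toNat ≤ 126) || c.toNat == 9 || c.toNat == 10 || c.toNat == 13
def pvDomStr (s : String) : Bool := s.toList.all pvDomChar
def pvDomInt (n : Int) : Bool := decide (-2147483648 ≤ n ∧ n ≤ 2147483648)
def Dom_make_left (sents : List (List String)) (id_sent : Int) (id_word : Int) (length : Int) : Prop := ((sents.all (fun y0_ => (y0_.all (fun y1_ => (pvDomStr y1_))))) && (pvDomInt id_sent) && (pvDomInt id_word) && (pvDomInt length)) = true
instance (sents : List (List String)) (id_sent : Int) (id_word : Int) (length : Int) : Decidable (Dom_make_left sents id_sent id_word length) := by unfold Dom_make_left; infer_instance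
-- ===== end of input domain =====

-- B replaces A's backward sentence-by-sentence gather (with n_needed bookkeeping and
-- double reversal) by one forward concatenation of the earlier sentences plus a single
-- tail slice — simpler, same return value on every input.

-- ===== PORT A =====
-- the while loop of A: left and id_sent are the mutated state
def make_left_loop (sents : List (List String)) (length : Int) (left : List String) (id_sent : Int) : List String :=
  if h : (left.length : Int) < length ∧ 0 ≤ id_sent then
    -- sents[id_sent]: in range here by the loop invariant (id_sent started at a valid
    -- index and only decreases), so the default of pyGet? is never taken
    let sent := (PySem.List.pyGet? sents id_sent).getD []
    let n_needed0 := length - (left.length : Int)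
    let n_needed := if (sent.length : Int) < n_needed0 then (sent.length : Int) else n_needed0
    let fetch := PySem.List.slice sent (some (-n_needed)) none   -- sents[id_sent][-n_needed::]
    make_left_loop sents length (left ++ fetch.reverse) (id_sent - 1)
  else left
termination_by (id_sent + 1).toNat
decreasing_by omega

def make_left (sents : List (List String)) (id_sent : Int) (id_word : Int) (length : Int) : String :=
  match PySem.List.pyGet? sents id_sent with
  | none => "AAAA AAAA"                              -- except IndexError
  | some sent =>
    let left := (PySem.List.slice sent none (some id_word)).reverse   -- [:id_word][::-1]
    PySem.Str.join " " (make_left_loop sents length left (id_sent - 1)).reverse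

-- ===== PORT B =====
def make_left_alt (sents : List (List String)) (id_sent : Int) (id_word : Int) (length : Int) : String :=
  match PySem.List.pyGet? sents id_sent with
  | none => "AAAA AAAA"                              -- except IndexError
  | some sent =>
    let pfx := PySem.List.slice sent none (some id_word)
    -- words = []; for s in sents[:max(id_sent, 0)]: words.extend(s)
    let words := (PySem.List.slice sents none (some (max id_sent 0))).foldl (· ++ ·) []
    let need := length - (pfx.length : Int)
    let ctx := if 0 < need then PySem.List.slice words (some (-need)) none else []
    PySem.Str.join " " (ctx ++ pfx)

-- ===== PRECONDITION & SPEC =====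
def Spec_make_left (sents : List (List String)) (id_sent : Int) (id_word : Int) (length : Int) (out : String) : Prop := out = make_left_alt sents id_sent id_word length
instance (sents : List (List String)) (id_sent : Int) (id_word : Int) (length : Int) (out : String) : Decidable (Spec_make_left sents id_sent id_word length out) := by unfold Spec_make_left; infer_instance

-- ===== CLAIM (what is proved, stated in full; the proofs are below) =====
def Claim_equal_make_left : Prop := ∀ (sents : List (List String)) (id_sent : Int) (id_word : Int) (length : Int), Dom_make_left sents id_sent id_word length → Spec_make_left sents id_sent id_word length (make_left sents id_sent id_word length)

-- ===== LEMMAS AND PROOFS =====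

-- the last n elements of xs (Python xs[-n:] for n > 0, [] for n ≤ 0)
def tailTake (n : Int) (xs : List String) : List String :=
  if 0 < n then xs.drop (xs.length - n.toNat) else []

-- Python xs[-n:] as a drop, for 0 < n
lemma slice_neg_from_eq (xs : List String) (n : Int) (h : 0 < n) :
    PySem.List.slice xs (some (-n)) none = xs.drop (xs.length - n.toNat) := by
  rw [PySem.List.slice_some_none]
  congr 1
  simp only [PySem.List.clampIdx, if_pos (show -n < 0 by omega)]
  split <;> omega

-- the loop, started below index j with accumulator `left`, returns (reversed) the last
-- (length - len left) words of the flattening of the first j sentences, then left again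
lemma make_left_loop_spec (sents : List (List String)) (length : Int) :
    ∀ (j : Nat), j ≤ sents.length → ∀ (left : List String),
      (make_left_loop sents length left ((j : Int) - 1)).reverse
        = tailTake (length - left.length) ((sents.take j).flatten) ++ left.reverse := by
  intro j
  induction j with
  | zero =>
    intro _ left
    rw [make_left_loop]
    simp [tailTake]
  | succ k ih =>
    intro hj left
    rw [make_left_loop]
    by_cases hlen : (left.length : Int) < length
    · have hk : k < sents.length := by omega
      have hpos : (0 : Int) ≤ (k + 1 : Nat) - 1 := by push_cast; omega
      rw [dif_pos ⟨hlen, hpos⟩]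
      have hidx : ((k + 1 : Nat) : Int) - 1 = ((k : Nat) : Int) := by push_cast; ring
      have hget : PySem.List.pyGet? sents (((k + 1 : Nat) : Int) - 1) = some sents[k] := by
        rw [hidx, PySem.List.pyGet?_natCast, List.getElem?_eq_getElem hk]
      simp only [hget, Option.getD_some]
      set s := sents[k] with hs
      set need := length - (left.length : Int) with hneed
      have hneedpos : 0 < need := by omega
      set n : Int := if (s.length : Int) < need then (s.length : Int) else need with hn
      have hn0 : 0 ≤ n := by rw [hn]; split <;> omega
      have hnle : n ≤ (s.length : Int) := by rw [hn]; split <;> omega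
      have hfetch : PySem.List.slice s (some (-n)) none = s.drop (s.length - n.toNat) := by
        by_cases h0 : 0 < n
        · exact slice_neg_from_eq s n h0
        · have hn0' : n = 0 := by omega
          have hslen : s.length = 0 := by
            rw [hn] at hn0'
            by_cases hc : (s.length : Int) < need
            · rw [if_pos hc] at hn0'; omega
            · rw [if_neg hc] at hn0'; omega
          rw [hn0']
          simp [PySem.List.slice_some_none, PySem.List.clampIdx,
            List.eq_nil_of_length_eq_zero hslen]
      rw [hfetch]
      have hrec : ((k + 1 : Nat) : Int) - 1 - 1 = ((k : Nat) : Int) - 1 := by push_cast; ring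
      rw [hrec, ih (by omega)]
      set fetch := s.drop (s.length - n.toNat) with hfetchdef
      have hflen : fetch.length = n.toNat := by
        rw [hfetchdef, List.length_drop]; omega
      have htake : sents.take (k + 1) = sents.take k ++ [s] := by
        rw [hs]; exact List.take_succ_eq_append_getElem hk  -- name checked below; fallback
      rw [htake, List.flatten_append, List.flatten_cons, List.flatten_nil, List.append_nil]
      set F := (sents.take k).flatten with hF
      -- goal: tailTake (length - (left ++ fetch.reverse).length) F ++ (left ++ fetch.reverse).reverse
      --     = tailTake need (F ++ s) ++ left.reverse
      simp only [List.length_append, List.length_reverse, List.reverse_append,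
        List.reverse_reverse, hflen]
      have hlhslen : length - ((left.length : Int) + (n.toNat : Int)) = need - n := by
        rw [hneed]; omega
      rw [show ((left.length + n.toNat : Nat) : Int) = (left.length : Int) + (n.toNat : Int) by push_cast; ring]
      rw [hlhslen, ← List.append_assoc]
      congr 1
      -- tailTake (need - n) F ++ fetch = tailTake need (F ++ s)
      rw [tailTake, tailTake, if_pos hneedpos, List.drop_append]
      simp only [List.length_append]
      by_cases hc : (s.length : Int) < need
      · have hn' : n = (s.length : Int) := by rw [hn, if_pos hc]
        have e2 : F.length + s.length - need.toNat - F.length = 0 := by omega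
        rw [e2, List.drop_zero]
        have hfs : fetch = s := by
          rw [hfetchdef]
          have e3 : s.length - n.toNat = 0 := by omega
          rw [e3, List.drop_zero]
        rw [hfs]
        congr 1
        split
        · congr 1
          omega
        · exfalso
          omega
      · have hn' : n = need := by rw [hn, if_neg hc]
        rw [if_neg (show ¬ 0 < need - n by omega), List.nil_append]
        have e2 : F.length + s.length - need.toNat = F.length + (s.length - need.toNat) := by
          omega
        rw [e2]
        have h3 : F.drop (F.length + (s.length - need.toNat)) = [] :=
          List.drop_eq_nil_of_le (by omega)
        rw [h3, List.nil_append, hfetchdef]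
        congr 1
        omega
    · rw [dif_neg (by tauto)]
      rw [tailTake, if_neg (by omega), List.nil_append]

-- ===== VERDICT (by name: the statement is the Claim_ definition above) =====
theorem make_left_spec : Claim_equal_make_left := by
  intro sents id_sent id_word length _
  unfold Spec_make_left make_left make_left_alt
  cases hget : PySem.List.pyGet? sents id_sent with
  | none => rfl
  | some sent =>
    dsimp only
    congr 1
    set pfx := PySem.List.slice sent none (some id_word) with hpre
    by_cases hneg : id_sent < 0
    · -- no earlier sentences are read: the loop exits at once, and B's words are empty
      rw [make_left_loop, dif_neg (by omega)]
      rw [max_eq_right (by omega : id_sent ≤ 0)]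
      rw [PySem.List.slice_to sents (by omega : (0:Int) ≤ 0)]
      simp [PySem.List.slice_some_none]
    · push Not at hneg
      have hlt : id_sent.toNat < sents.length := by
        by_contra hge
        push_neg at hge
        rw [show id_sent = (id_sent.toNat : Int) by omega, PySem.List.pyGet?_natCast,
          List.getElem?_eq_none (by omega)] at hget
        simp at hget
      have h1 : id_sent - 1 = ((id_sent.toNat : Nat) : Int) - 1 := by omega
      rw [h1, make_left_loop_spec sents length id_sent.toNat (by omega) pfx.reverse]
      rw [List.reverse_reverse, List.length_reverse]
      rw [max_eq_left hneg, PySem.List.slice_to sents hneg,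
        PySem.List.foldl_append_eq_flatten, List.nil_append]
      rw [tailTake]
      by_cases hp : 0 < length - ((PySem.List.slice sent none (some id_word)).length : Int)
      · rw [if_pos hp, if_pos hp, slice_neg_from_eq _ _ hp]
      · rw [if_neg hp, if_neg hp]
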